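-- pv_equiv track=rewrite | github.com/jtheoc80/Home-Services-Lead-Generation | example_unified_main.py | is_residential_permit
-- ===== SOURCE A (Python) =====
-- from typing import List, Dict, Any
--
-- def is_residential_permit(record: Dict[str, Any]) -> bool:
--     """Determine if a permit is residential (same logic for all sources)."""
--
--     # Check category field first
--     category = record.get("category", "").lower()
--     if "residential" in category:
--         return True
--
--     # Check work class
--     work_class = record.get("work_class", "").lower()
--     if "residential" in work_class:
--         return True
--
--     # Keyword-based classification
--     RESIDENTIAL_KEYWORDS = [
--         "single family",
--         "duplex",
--         "townhouse",
--         "condo",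
--         "residential",
--         "house",
--         "home",
--         "dwelling",
--         "apartment",
--         "kitchen",
--         "bathroom",
--         "bedroom",
--         "garage",
--         "fence",
--         "pool",
--         "deck",
--         "patio",
--     ]
--
--     description = record.get("description", "").lower()
--     for keyword in RESIDENTIAL_KEYWORDS:
--         if keyword in description:
--             return True
--
--     return False
-- ===== SOURCE B (Python) =====
-- RESIDENTIAL_KEYWORDS = [
--     "single family",
--     "duplex",
--     "townhouse",
--     "condo",
--     "residential",
--     "house",
--     "home",
--     "dwelling",
--     "apartment",
--     "kitchen",
--     "bathroom",
--     "bedroom",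
--     "garage",
--     "fence",
--     "pool",
--     "deck",
--     "patio",
-- ]
--
--
-- def _scan_any(text, keywords):
--     """Single position-major pass: at each position, test every keyword."""
--     for i in range(len(text) + 1):
--         for kw in keywords:
--             if text.startswith(kw, i):
--                 return True
--     return False
--
--
-- def is_residential_permit(record):
--     if _scan_any(record.get("category", "").lower(), ["residential"]):
--         return True
--     if _scan_any(record.get("work_class", "").lower(), ["residential"]):
--         return True
--     return _scan_any(record.get("description", "").lower(), RESIDENTIAL_KEYWORDS)
-- ===== Notes on version B (the rewrite author's own statement) =====
-- stated objective: alternative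
-- what changed: Replaces the keyword-major sequence of full 'in' substring scans with one position-major pass over each lowercased field that tests every keyword as a prefix at each position (a naive multi-pattern matcher), and routes all three field checks through that single helper.
import Mathlib
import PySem

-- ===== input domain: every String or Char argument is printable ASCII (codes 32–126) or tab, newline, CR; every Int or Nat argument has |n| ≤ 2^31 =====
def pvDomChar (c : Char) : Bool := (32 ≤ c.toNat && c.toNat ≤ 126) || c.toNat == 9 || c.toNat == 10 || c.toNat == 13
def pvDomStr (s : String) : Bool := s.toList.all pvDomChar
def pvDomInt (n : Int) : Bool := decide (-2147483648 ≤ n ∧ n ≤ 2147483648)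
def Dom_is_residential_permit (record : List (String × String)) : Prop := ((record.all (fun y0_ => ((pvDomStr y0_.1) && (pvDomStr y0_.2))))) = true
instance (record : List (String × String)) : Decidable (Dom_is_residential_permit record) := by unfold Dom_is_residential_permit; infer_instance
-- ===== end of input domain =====

-- B routes all three checks through one position-major scan (prefix test of every
-- keyword at every position) instead of A's keyword-major repeated 'in' substring scans;
-- objective: alternative (same asymptotic cost).

-- ===== PORT A =====
def pvKeywords : List String :=
  ["single family", "duplex", "townhouse", "condo", "residential", "house", "home",
   "dwelling", "apartment", "kitchen", "bathroom", "bedroom", "garage", "fence",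
   "pool", "deck", "patio"]

def is_residential_permit (record : List (String × String)) : Bool :=
  let d : PySem.Dict String String := PySem.Dict.mk record
  let category := PySem.Str.lower (d.getD "category" "")
  if PySem.Str.isIn "residential" category then true else
  let work_class := PySem.Str.lower (d.getD "work_class" "")
  if PySem.Str.isIn "residential" work_class then true else
  let description := PySem.Str.lower (d.getD "description" "")
  -- the for-loop with early 'return True' over the keyword list
  pvKeywords.any (fun kw => PySem.Str.isIn kw description)

-- ===== PORT B =====
-- text.startswith(kw, i) for 0 ≤ i ≤ len(text) is exactly kw.toList <+: text.toList.drop i;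
-- PySem.Chars.startswith on the dropped suffix is exact there.
def pvScanAny (text : String) (kws : List String) : Bool :=
  (List.range (text.toList.length + 1)).any (fun i =>
    kws.any (fun kw => PySem.Chars.startswith (text.toList.drop i) kw.toList))

def is_residential_permit_alt (record : List (String × String)) : Bool :=
  let d : PySem.Dict String String := PySem.Dict.mk record
  if pvScanAny (PySem.Str.lower (d.getD "category" "")) ["residential"] then true else
  if pvScanAny (PySem.Str.lower (d.getD "work_class" "")) ["residential"] then true else
  pvScanAny (PySem.Str.lower (d.getD "description" "")) pvKeywords

-- ===== PRECONDITION & SPEC =====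
def Spec_is_residential_permit (record : List (String × String)) (out : Bool) : Prop := out = is_residential_permit_alt record
instance (record : List (String × String)) (out : Bool) : Decidable (Spec_is_residential_permit record out) := by unfold Spec_is_residential_permit; infer_instance

-- ===== CLAIM (what is proved, stated in full; the proofs are below) =====
def Claim_equal_is_residential_permit : Prop := ∀ (record : List (String × String)), Dom_is_residential_permit record → Spec_is_residential_permit record (is_residential_permit record)

-- ===== LEMMAS AND PROOFS =====
theorem pvScanAny_eq (text : String) (kws : List String) :
    pvScanAny text kws = kws.any (fun kw => PySem.Str.isIn kw text) := by
  rw [Bool.eq_iff_iff]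
  simp only [pvScanAny, List.any_eq_true, List.mem_range, PySem.Chars.startswith_iff,
    PySem.Str.isIn]
  constructor
  · rintro ⟨i, _, kw, hkw, hpre⟩
    exact ⟨kw, hkw, (PySem.Chars.exists_prefix_drop_iff_isIn _ _).mp ⟨i, hpre⟩⟩
  · rintro ⟨kw, hkw, hin⟩
    obtain ⟨j, hpre⟩ := (PySem.Chars.exists_prefix_drop_iff_isIn _ _).mpr hin
    refine ⟨min j text.toList.length, by omega, kw, hkw, ?_⟩
    rcases Nat.le_total j text.toList.length with h | h
    · rw [Nat.min_eq_left h]; exact hpre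
    · rw [Nat.min_eq_right h, List.drop_length]
      rw [List.drop_eq_nil_of_le h] at hpre
      exact hpre

-- ===== VERDICT (by name: the statement is the Claim_ definition above) =====
theorem is_residential_permit_spec : Claim_equal_is_residential_permit := by
  intro record _
  show is_residential_permit record = is_residential_permit_alt record
  simp only [is_residential_permit, is_residential_permit_alt, pvScanAny_eq,
    List.any_cons, List.any_nil, Bool.or_false]
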